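-- pv_equiv track=rewrite | github.com/TheMarcosB/test | lib/Number.py | _bytetoken
-- ===== SOURCE A (Python) =====
-- _bytetypes = {
--     1000: [
--         ['kb',  'kilo'],
--         ['mb',  'mega'],
--         ['gb',  'giga'],
--         ['tb',  'tera'],
--         ['pb',  'peta'],
--         ['eb',  'exa'],
--         ['zb',  'zetta'],
--         ['yb',  'yotta']
--     ],
--
--     1024: [
--         ['kib',  'kibi'],
--         ['mib',  'mebi'],
--         ['gib',  'gibi'],
--         ['tib',  'tebi'],
--         ['pib',  'pebi'],
--         ['eib',  'exbi'],
--         ['zib',  'zebi'],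
--         ['yib',  'yobi']
--     ]
-- }
--
-- def _bytetoken(token):
--     devolve, token = (8, 'byte'), token.lower()
--     if token[-1 : ] == 's': token = token[0 : -1]
--     if token.find('byte') >= 4: token = token[0 : token.find('byte')]
--     if token == 'bit': devolve = 1, 'bit'
--     elif not token in ['b', 'byte']:
--         for number, values in _bytetypes.items():
--             count = 1
--             for keys in values:
--                 if token in keys:
--                     devolve = 8 * (number ** count), keys[0]
--                     break
--                 count += 1
--     return devolve
-- ===== SOURCE B (Python) =====
-- _PREFIXES = 'kmgtpezy'
-- _DEC_NAMES = ['kilo', 'mega', 'giga', 'tera', 'peta', 'exa', 'zetta', 'yotta']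
-- _BIN_NAMES = ['kibi', 'mebi', 'gibi', 'tebi', 'pebi', 'exbi', 'zebi', 'yobi']
--
--
-- def _dispatch(token):
--     # from token[0]'s SI-prefix index i, build the four candidate spellings and compare
--     if not token:
--         return (8, 'byte')
--     i = _PREFIXES.find(token[0])
--     if i < 0:
--         return (8, 'byte')
--     if token == _PREFIXES[i] + 'b' or token == _DEC_NAMES[i]:
--         return (8 * 1000 ** (i + 1), _PREFIXES[i] + 'b')
--     if token == _PREFIXES[i] + 'ib' or token == _BIN_NAMES[i]:
--         return (8 * 1024 ** (i + 1), _PREFIXES[i] + 'ib')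
--     return (8, 'byte')
--
--
-- def _bytetoken(token):
--     token = token.lower()
--     if token[-1:] == 's':
--         token = token[:-1]
--     p = token.find('byte')
--     if p >= 4:
--         token = token[:p]
--     if token == 'bit':
--         return (1, 'bit')
--     return _dispatch(token)
-- ===== Notes on version B (the rewrite author's own statement) =====
-- stated objective: alternative
-- what changed: Instead of scanning the nested unit table entry by entry with a manual counter and break, B dispatches on the normalized token's first character to get the SI prefix index directly and then synthesizes and compares the only four possible spellings for that prefix (abbreviation, long name, binary abbreviation, binary long name), computing bits as 8*1000**(i+1) or 8*1024**(i+1); 'bit' is checked first and everything else defaults to (8, 'byte').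
import Mathlib
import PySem

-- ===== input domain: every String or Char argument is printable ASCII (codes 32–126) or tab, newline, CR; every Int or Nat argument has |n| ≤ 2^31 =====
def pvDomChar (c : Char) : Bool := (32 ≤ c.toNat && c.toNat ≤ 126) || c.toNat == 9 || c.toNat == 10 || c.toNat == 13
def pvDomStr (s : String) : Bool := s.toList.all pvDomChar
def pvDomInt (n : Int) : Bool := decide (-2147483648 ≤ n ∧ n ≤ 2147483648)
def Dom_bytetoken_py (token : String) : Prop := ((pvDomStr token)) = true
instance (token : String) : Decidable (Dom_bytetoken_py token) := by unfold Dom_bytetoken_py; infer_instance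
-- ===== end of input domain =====

-- B replaces A's doubly-nested table scan by a first-character dispatch that synthesizes the four
-- candidate spellings (abbrev/long, decimal/binary) for that prefix and compares once (objective: alternative).


-- ===== PORT A =====
-- the module-level _bytetypes table (dict → association list in insertion order)
def pvBytetypes : List (Int × List (List String)) :=
  [(1000, [["kb", "kilo"], ["mb", "mega"], ["gb", "giga"], ["tb", "tera"],
           ["pb", "peta"], ["eb", "exa"], ["zb", "zetta"], ["yb", "yotta"]]),
   (1024, [["kib", "kibi"], ["mib", "mebi"], ["gib", "gibi"], ["tib", "tebi"],
           ["pib", "pebi"], ["eib", "exbi"], ["zib", "zebi"], ["yib", "yobi"]])]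

-- inner 'for keys in values' loop with the count accumulator and the break
def pvScanInner (token : String) (number : Int) (count : Nat)
    (values : List (List String)) (devolve : Int × String) : Int × String :=
  match values with
  | [] => devolve
  | keys :: rest =>
      if keys.contains token then (8 * number ^ count, keys.headD "")  -- keys[0]; every key list is a nonempty literal
      else pvScanInner token number (count + 1) rest devolve

-- outer 'for number, values in _bytetypes.items()' loop
def pvScanOuter (token : String) : List (Int × List (List String)) → (Int × String) → Int × String
  | [], devolve => devolve
  | (number, values) :: rest, devolve =>
      pvScanOuter token rest (pvScanInner token number 1 values devolve)

def bytetoken_py (token : String) : Int × String :=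
  let t0 := PySem.Str.lower token
  let t1 := if PySem.Str.slice t0 (some (-1)) none = "s" then PySem.Str.slice t0 (some 0) (some (-1)) else t0
  let t2 := if PySem.Str.find t1 "byte" ≥ 4 then PySem.Str.slice t1 (some 0) (some (PySem.Str.find t1 "byte")) else t1
  if t2 = "bit" then (1, "bit")
  else if ¬ (["b", "byte"].contains t2) then pvScanOuter t2 pvBytetypes (8, "byte")
  else (8, "byte")

-- ===== PORT B =====
-- B's module constants: the prefix letters and the two long-name tables, indexed in parallel
def pvPrefixes : List Char := ['k', 'm', 'g', 't', 'p', 'e', 'z', 'y']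
def pvDecNames : List String := ["kilo", "mega", "giga", "tera", "peta", "exa", "zetta", "yotta"]
def pvBinNames : List String := ["kibi", "mebi", "gibi", "tebi", "pebi", "exbi", "zebi", "yobi"]

-- _PREFIXES.find(token[0]): left-to-right scan returning the index of the first match
def pvFindChar : List Char → Char → Option Nat
  | [], _ => none
  | x :: xs, c => if x = c then some 0 else (pvFindChar xs c).map (· + 1)

-- the prefix dispatch: from token[0]'s index i, build the four candidate spellings and compare
def pvDispatch (t : String) : Int × String :=
  match t.toList with
  | [] => (8, "byte")                          -- 'if token:' falls through on the empty string
  | c :: _ =>                                   -- c = token[0]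
    match pvFindChar pvPrefixes c with
    | none => (8, "byte")
    | some i =>
      if t = String.ofList [c, 'b'] ∨ t = pvDecNames.getD i "" then
        (8 * 1000 ^ (i + 1), String.ofList [c, 'b'])
      else if t = String.ofList [c, 'i', 'b'] ∨ t = pvBinNames.getD i "" then
        (8 * 1024 ^ (i + 1), String.ofList [c, 'i', 'b'])
      else (8, "byte")

def bytetoken_py_alt (token : String) : Int × String :=
  let t0 := PySem.Str.lower token
  let t1 := if PySem.Str.slice t0 (some (-1)) none = "s" then PySem.Str.slice t0 (some 0) (some (-1)) else t0
  let p := PySem.Str.find t1 "byte"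
  let t := if p ≥ 4 then PySem.Str.slice t1 (some 0) (some p) else t1
  if t = "bit" then (1, "bit") else pvDispatch t

-- ===== PRECONDITION & SPEC =====
def Spec_bytetoken_py (token : String) (out : Int × String) : Prop := out = bytetoken_py_alt token
instance (token : String) (out : Int × String) : Decidable (Spec_bytetoken_py token out) := by unfold Spec_bytetoken_py; infer_instance

-- ===== CLAIM (what is proved, stated in full; the proofs are below) =====
def Claim_equal_bytetoken_py : Prop := ∀ (token : String), Dom_bytetoken_py token → Spec_bytetoken_py token (bytetoken_py token)

-- ===== LEMMAS AND PROOFS =====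

-- after the (shared) normalization, A's branch-and-scan equals B's first-char dispatch
set_option maxRecDepth 4096 in
theorem pv_tail_eq (t : String) :
    (if t = "bit" then ((1 : Int), "bit")
     else if ¬ (["b", "byte"].contains t) then pvScanOuter t pvBytetypes (8, "byte")
     else (8, "byte"))
    =
    (if t = "bit" then ((1 : Int), "bit")
     else pvDispatch t) := by
  unfold pvDispatch
  by_cases h0 : t = "bit"; · subst h0; decide
  by_cases h1 : t = "b"; · subst h1; decide
  by_cases h2 : t = "byte"; · subst h2; decide
  by_cases h3 : t = "kb"; · subst h3; decide
  by_cases h4 : t = "kilo"; · subst h4; decide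
  by_cases h5 : t = "mb"; · subst h5; decide
  by_cases h6 : t = "mega"; · subst h6; decide
  by_cases h7 : t = "gb"; · subst h7; decide
  by_cases h8 : t = "giga"; · subst h8; decide
  by_cases h9 : t = "tb"; · subst h9; decide
  by_cases h10 : t = "tera"; · subst h10; decide
  by_cases h11 : t = "pb"; · subst h11; decide
  by_cases h12 : t = "peta"; · subst h12; decide
  by_cases h13 : t = "eb"; · subst h13; decide
  by_cases h14 : t = "exa"; · subst h14; decide
  by_cases h15 : t = "zb"; · subst h15; decide
  by_cases h16 : t = "zetta"; · subst h16; decide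
  by_cases h17 : t = "yb"; · subst h17; decide
  by_cases h18 : t = "yotta"; · subst h18; decide
  by_cases h19 : t = "kib"; · subst h19; decide
  by_cases h20 : t = "kibi"; · subst h20; decide
  by_cases h21 : t = "mib"; · subst h21; decide
  by_cases h22 : t = "mebi"; · subst h22; decide
  by_cases h23 : t = "gib"; · subst h23; decide
  by_cases h24 : t = "gibi"; · subst h24; decide
  by_cases h25 : t = "tib"; · subst h25; decide
  by_cases h26 : t = "tebi"; · subst h26; decide
  by_cases h27 : t = "pib"; · subst h27; decide
  by_cases h28 : t = "pebi"; · subst h28; decide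
  by_cases h29 : t = "eib"; · subst h29; decide
  by_cases h30 : t = "exbi"; · subst h30; decide
  by_cases h31 : t = "zib"; · subst h31; decide
  by_cases h32 : t = "zebi"; · subst h32; decide
  by_cases h33 : t = "yib"; · subst h33; decide
  by_cases h34 : t = "yobi"; · subst h34; decide
  -- t is none of the recognized tokens: A's scan finds nothing, B's candidates all fail
  have hA : pvScanOuter t pvBytetypes (8, "byte") = (8, "byte") := by
    simp [pvScanOuter, pvScanInner, pvBytetypes,
          h3, h4, h5, h6, h7, h8, h9, h10, h11, h12, h13, h14, h15, h16, h17, h18,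
          h19, h20, h21, h22, h23, h24, h25, h26, h27, h28, h29, h30, h31, h32, h33, h34]
  rw [if_neg h0, if_neg h0, if_pos (by simp [h1, h2]), hA]
  rcases hl : t.toList with _ | ⟨c, rest⟩
  · rfl
  · by_cases hck : c = 'k'
    · subst hck
      dsimp only
      rw [show pvFindChar pvPrefixes 'k' = some 0 from by decide]
      simp [show String.ofList ['k', 'b'] = "kb" from by decide,
            show String.ofList ['k', 'i', 'b'] = "kib" from by decide,
            pvDecNames, pvBinNames, List.getD, h3, h4, h19, h20]
    by_cases hcm : c = 'm'
    · subst hcm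
      dsimp only
      rw [show pvFindChar pvPrefixes 'm' = some 1 from by decide]
      simp [show String.ofList ['m', 'b'] = "mb" from by decide,
            show String.ofList ['m', 'i', 'b'] = "mib" from by decide,
            pvDecNames, pvBinNames, List.getD, h5, h6, h21, h22]
    by_cases hcg : c = 'g'
    · subst hcg
      dsimp only
      rw [show pvFindChar pvPrefixes 'g' = some 2 from by decide]
      simp [show String.ofList ['g', 'b'] = "gb" from by decide,
            show String.ofList ['g', 'i', 'b'] = "gib" from by decide,
            pvDecNames, pvBinNames, List.getD, h7, h8, h23, h24]
    by_cases hct : c = 't'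
    · subst hct
      dsimp only
      rw [show pvFindChar pvPrefixes 't' = some 3 from by decide]
      simp [show String.ofList ['t', 'b'] = "tb" from by decide,
            show String.ofList ['t', 'i', 'b'] = "tib" from by decide,
            pvDecNames, pvBinNames, List.getD, h9, h10, h25, h26]
    by_cases hcp : c = 'p'
    · subst hcp
      dsimp only
      rw [show pvFindChar pvPrefixes 'p' = some 4 from by decide]
      simp [show String.ofList ['p', 'b'] = "pb" from by decide,
            show String.ofList ['p', 'i', 'b'] = "pib" from by decide,
            pvDecNames, pvBinNames, List.getD, h11, h12, h27, h28]
    by_cases hce : c = 'e'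
    · subst hce
      dsimp only
      rw [show pvFindChar pvPrefixes 'e' = some 5 from by decide]
      simp [show String.ofList ['e', 'b'] = "eb" from by decide,
            show String.ofList ['e', 'i', 'b'] = "eib" from by decide,
            pvDecNames, pvBinNames, List.getD, h13, h14, h29, h30]
    by_cases hcz : c = 'z'
    · subst hcz
      dsimp only
      rw [show pvFindChar pvPrefixes 'z' = some 6 from by decide]
      simp [show String.ofList ['z', 'b'] = "zb" from by decide,
            show String.ofList ['z', 'i', 'b'] = "zib" from by decide,
            pvDecNames, pvBinNames, List.getD, h15, h16, h31, h32]
    by_cases hcy : c = 'y'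
    · subst hcy
      dsimp only
      rw [show pvFindChar pvPrefixes 'y' = some 7 from by decide]
      simp [show String.ofList ['y', 'b'] = "yb" from by decide,
            show String.ofList ['y', 'i', 'b'] = "yib" from by decide,
            pvDecNames, pvBinNames, List.getD, h17, h18, h33, h34]
    dsimp only
    rw [show pvFindChar pvPrefixes c = none from by
          simp [pvFindChar, pvPrefixes, Ne.symm hck, Ne.symm hcm, Ne.symm hcg, Ne.symm hct, Ne.symm hcp, Ne.symm hce, Ne.symm hcz, Ne.symm hcy]]

-- ===== VERDICT (by name: the statement is the Claim_ definition above) =====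
theorem bytetoken_py_spec : Claim_equal_bytetoken_py := by
  intro token _
  unfold Spec_bytetoken_py bytetoken_py bytetoken_py_alt
  exact pv_tail_eq _
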